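-- pv_equiv track=rewrite | github.com/ZadorozhnyiKostiantyn/DataStructureAlgorithm | Lab3/main.py | lecuyer
-- ===== SOURCE A (Python) =====
-- def lecuyer(seed1: int, seed2: int, n: int) -> list:
--     """
--     Implementation of L'Ecuyer generator.
--
--     Args:
--         seed1 (int): The seed value for the first generator.
--         seed2 (int): The seed value for the second generator.
--         n (int): The number of numbers to generate.
--
--     Returns:
--         list: A list of n pseudorandom numbers generated by the L'Ecuyer generator.
--     """
--
--     # Initialize constants
--     m1 = 2 ** 31 - 1
--     m2 = 2 ** 29 - 1
--     a1 = 16807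
--     a2 = 48271
--     q1 = m1 // a1
--     q2 = m2 // a2
--     r1 = m1 % a1
--     r2 = m2 % a2
--
--     # Initialize state
--     x1 = seed1 % m1
--     x2 = seed2 % m2
--
--     # list generate numbers
--     numbers = []
--
--     for i in range(n):
--         # Compute new states
--         k1 = x1 // q1
--         x1 = a1 * (x1 % q1) - r1 * k1
--         if x1 < 0:
--             x1 += m1
--
--         k2 = x2 // q2
--         x2 = a2 * (x2 % q2) - r2 * k2
--         if x2 < 0:
--             x2 += m2
--
--         # Compute pseudorandom number
--         numbers.append((x1 - x2) % m1)
--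
--     return numbers
-- ===== SOURCE B (Python) =====
-- def lecuyer(seed1: int, seed2: int, n: int) -> list:
--     """L'Ecuyer generator via the closed form x_i = seed * a**i (mod m),
--     computed per index with modular exponentiation instead of iterating the state."""
--     m1 = 2 ** 31 - 1
--     m2 = 2 ** 29 - 1
--     idx = range(1, max(n, 0) + 1)
--     s1 = [seed1 % m1 * pow(16807, i, m1) % m1 for i in idx]
--     s2 = [seed2 % m2 * pow(48271, i, m2) % m2 for i in idx]
--     return [(a - b) % m1 for a, b in zip(s1, s2)]
-- ===== Notes on version B (the rewrite author's own statement) =====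
-- stated objective: alternative
-- what changed: Replaces the sequential state-updating loop (Schrage's decomposition with q/r/k and negative-corrections) by a stateless closed form: each element is computed independently as seed*a^i mod m via modular exponentiation, in two staged comprehensions that are then zipped and combined mod m1.
import Mathlib
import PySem

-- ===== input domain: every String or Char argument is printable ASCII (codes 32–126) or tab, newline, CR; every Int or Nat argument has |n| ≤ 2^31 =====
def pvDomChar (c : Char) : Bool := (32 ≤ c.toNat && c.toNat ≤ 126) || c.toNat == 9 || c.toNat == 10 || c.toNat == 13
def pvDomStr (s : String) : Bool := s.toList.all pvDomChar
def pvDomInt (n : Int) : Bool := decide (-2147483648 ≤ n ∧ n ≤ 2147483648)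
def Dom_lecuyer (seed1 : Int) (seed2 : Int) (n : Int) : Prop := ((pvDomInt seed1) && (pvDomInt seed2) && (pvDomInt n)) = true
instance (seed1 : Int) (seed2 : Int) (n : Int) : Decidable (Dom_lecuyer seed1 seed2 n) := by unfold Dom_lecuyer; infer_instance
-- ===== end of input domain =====

set_option maxRecDepth 4000

-- B replaces the sequential Schrage-decomposition loop by a per-index closed form seed*a^i mod m (modular exponentiation), staged comprehensions + zip; same output.


-- ===== PORT A =====
-- loop body of A (Schrage's decomposition with the negative correction), constants passed in from A's lets
def lecuyerStepA (m1 m2 a1 a2 q1 q2 r1 r2 : Int) (st : Int × Int × List Int) (_i : Int) :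
    Int × Int × List Int :=
  let x1 := st.1
  let x2 := st.2.1
  let numbers := st.2.2
  let k1 := PySem.Int.floordiv x1 q1
  let x1 := a1 * (PySem.Int.mod x1 q1) - r1 * k1
  let x1 := if x1 < 0 then x1 + m1 else x1
  let k2 := PySem.Int.floordiv x2 q2
  let x2 := a2 * (PySem.Int.mod x2 q2) - r2 * k2
  let x2 := if x2 < 0 then x2 + m2 else x2
  (x1, x2, numbers ++ [PySem.Int.mod (x1 - x2) m1])

def lecuyer (seed1 : Int) (seed2 : Int) (n : Int) : List Int :=
  let m1 : Int := 2 ^ 31 - 1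
  let m2 : Int := 2 ^ 29 - 1
  let a1 : Int := 16807
  let a2 : Int := 48271
  let q1 := PySem.Int.floordiv m1 a1
  let q2 := PySem.Int.floordiv m2 a2
  let r1 := PySem.Int.mod m1 a1
  let r2 := PySem.Int.mod m2 a2
  let x1 := PySem.Int.mod seed1 m1
  let x2 := PySem.Int.mod seed2 m2
  let res := (PySem.List.pyRange 0 n 1).foldl (lecuyerStepA m1 m2 a1 a2 q1 q2 r1 r2) (x1, x2, [])
  res.2.2

-- ===== PORT B =====
-- Source B: idx = range(1, max(n,0)+1); two staged comprehensions with pow(a, i, m) = a^i % m; zip & combine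
def lecuyer_alt (seed1 : Int) (seed2 : Int) (n : Int) : List Int :=
  let m1 : Int := 2 ^ 31 - 1
  let m2 : Int := 2 ^ 29 - 1
  let idx := PySem.List.pyRange 1 (max n 0 + 1) 1
  let s1 := idx.map (fun i => PySem.Int.mod (PySem.Int.mod seed1 m1 * PySem.Int.mod (16807 ^ i.toNat) m1) m1)
  let s2 := idx.map (fun i => PySem.Int.mod (PySem.Int.mod seed2 m2 * PySem.Int.mod (48271 ^ i.toNat) m2) m2)
  (s1.zip s2).map (fun p => PySem.Int.mod (p.1 - p.2) m1)

-- ===== PRECONDITION & SPEC =====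
def Spec_lecuyer (seed1 : Int) (seed2 : Int) (n : Int) (out : List Int) : Prop := out = lecuyer_alt seed1 seed2 n
instance (seed1 : Int) (seed2 : Int) (n : Int) (out : List Int) : Decidable (Spec_lecuyer seed1 seed2 n out) := by unfold Spec_lecuyer; infer_instance

-- ===== CLAIM =====
def Claim_equal_lecuyer : Prop := ∀ (seed1 : Int) (seed2 : Int) (n : Int), Dom_lecuyer seed1 seed2 n → Spec_lecuyer seed1 seed2 n (lecuyer seed1 seed2 n)

-- ===== LEMMAS AND PROOFS =====

-- Schrage's step for (m, a, q, r) = (2^31-1, 16807, 127773, 2836) equals the direct modular step on [0, m)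
theorem schrage1 (x : Int) (h0 : 0 ≤ x) (h1 : x < 2147483647) :
    (if 16807 * (PySem.Int.mod x 127773) - 2836 * (PySem.Int.floordiv x 127773) < 0
     then 16807 * (PySem.Int.mod x 127773) - 2836 * (PySem.Int.floordiv x 127773) + 2147483647
     else 16807 * (PySem.Int.mod x 127773) - 2836 * (PySem.Int.floordiv x 127773))
    = (16807 * x) % 2147483647 := by
  rw [PySem.Int.mod_eq_emod_of_pos (a := x) (by norm_num),
      PySem.Int.floordiv_eq_ediv_of_pos (a := x) (by norm_num)]
  omega

-- Schrage's step for (m, a, q, r) = (2^29-1, 48271, 11122, 849) equals the direct modular step on [0, m)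
theorem schrage2 (x : Int) (h0 : 0 ≤ x) (h1 : x < 536870911) :
    (if 48271 * (PySem.Int.mod x 11122) - 849 * (PySem.Int.floordiv x 11122) < 0
     then 48271 * (PySem.Int.mod x 11122) - 849 * (PySem.Int.floordiv x 11122) + 536870911
     else 48271 * (PySem.Int.mod x 11122) - 849 * (PySem.Int.floordiv x 11122))
    = (48271 * x) % 536870911 := by
  rw [PySem.Int.mod_eq_emod_of_pos (a := x) (by norm_num),
      PySem.Int.floordiv_eq_ediv_of_pos (a := x) (by norm_num)]
  omega

-- A's fold, from in-range states, yields acc ++ the closed form (indexed by step count)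
theorem loop_closed (l : List Int) (x1 x2 : Int) (acc : List Int)
    (h10 : 0 ≤ x1) (h11 : x1 < 2147483647) (h20 : 0 ≤ x2) (h21 : x2 < 536870911) :
    (l.foldl (lecuyerStepA 2147483647 536870911 16807 48271 127773 11122 2836 849) (x1, x2, acc)).2.2
      = acc ++ (List.range l.length).map (fun j =>
          PySem.Int.mod ((16807 ^ (j + 1) * x1) % 2147483647 - (48271 ^ (j + 1) * x2) % 536870911) 2147483647) := by
  induction l generalizing x1 x2 acc with
  | nil => simp
  | cons i t ih =>
    simp only [List.foldl_cons, List.length_cons]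
    have e1 := schrage1 x1 h10 h11
    have e2 := schrage2 x2 h20 h21
    have hstep : lecuyerStepA 2147483647 536870911 16807 48271 127773 11122 2836 849 (x1, x2, acc) i
        = ((16807 * x1) % 2147483647, (48271 * x2) % 536870911,
           acc ++ [PySem.Int.mod ((16807 * x1) % 2147483647 - (48271 * x2) % 536870911) 2147483647]) := by
      simp only [lecuyerStepA]
      rw [← e1, ← e2]
    rw [hstep, ih _ _ _ (Int.emod_nonneg _ (by norm_num)) (Int.emod_lt_of_pos _ (by norm_num))
        (Int.emod_nonneg _ (by norm_num)) (Int.emod_lt_of_pos _ (by norm_num))]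
    rw [List.range_succ_eq_map, List.map_cons, List.map_map, List.append_assoc,
        List.singleton_append]
    refine congrArg (acc ++ ·) (congrArg₂ List.cons ?_ ?_)
    · norm_num
    apply List.map_congr_left
    intro j _
    simp only [Function.comp]
    have h1 : (16807 ^ (j + 1) * ((16807 * x1) % 2147483647)) % 2147483647
        = (16807 ^ (j + 1 + 1) * x1) % 2147483647 := by
      rw [Int.mul_emod, Int.emod_emod_of_dvd _ (by norm_num), ← Int.mul_emod]
      ring_nf
    have h2 : (48271 ^ (j + 1) * ((48271 * x2) % 536870911)) % 536870911
        = (48271 ^ (j + 1 + 1) * x2) % 536870911 := by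
      rw [Int.mul_emod, Int.emod_emod_of_dvd _ (by norm_num), ← Int.mul_emod]
      ring_nf
    rw [h1, h2]

-- B's zipped staged maps equal the same closed form
theorem alt_closed (seed1 seed2 n : Int) :
    lecuyer_alt seed1 seed2 n
      = (List.range n.toNat).map (fun j =>
          PySem.Int.mod ((16807 ^ (j + 1) * PySem.Int.mod seed1 2147483647) % 2147483647
            - (48271 ^ (j + 1) * PySem.Int.mod seed2 536870911) % 536870911) 2147483647) := by
  unfold lecuyer_alt
  rw [PySem.List.pyRange_one]
  have hn : (max n 0 + 1 - 1).toNat = n.toNat := by omega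
  rw [hn]
  simp only [List.map_map]
  rw [List.zip_map', List.map_map]
  apply List.map_congr_left
  intro j _
  simp only [Function.comp]
  have ht : ((1 : Int) + (j : Int)).toNat = j + 1 := by omega
  rw [ht]
  congr 2
  · rw [PySem.Int.mod_eq_emod_of_pos (a := PySem.Int.mod seed1 (2^31-1) * _) (by norm_num),
        PySem.Int.mod_eq_emod_of_pos (a := (16807 ^ (j+1) : Int)) (by norm_num)]
    rw [Int.mul_emod, Int.emod_emod_of_dvd _ (by norm_num), ← Int.mul_emod]
    norm_num [Int.mul_comm]
  · rw [PySem.Int.mod_eq_emod_of_pos (a := PySem.Int.mod seed2 (2^29-1) * _) (by norm_num),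
        PySem.Int.mod_eq_emod_of_pos (a := (48271 ^ (j+1) : Int)) (by norm_num)]
    rw [Int.mul_emod, Int.emod_emod_of_dvd _ (by norm_num), ← Int.mul_emod]
    norm_num [Int.mul_comm]

-- ===== VERDICT =====
theorem lecuyer_spec : Claim_equal_lecuyer := by
  intro seed1 seed2 n _
  unfold Spec_lecuyer
  rw [alt_closed]
  unfold lecuyer
  have hq1 : PySem.Int.floordiv (2 ^ 31 - 1) 16807 = 127773 := by decide
  have hq2 : PySem.Int.floordiv (2 ^ 29 - 1) 48271 = 11122 := by decide
  have hr1 : PySem.Int.mod (2 ^ 31 - 1 : Int) 16807 = 2836 := by decide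
  have hr2 : PySem.Int.mod (2 ^ 29 - 1 : Int) 48271 = 849 := by decide
  simp only [hq1, hq2, hr1, hr2]
  norm_num only
  rw [loop_closed _ _ _ _ (PySem.Int.mod_nonneg _ (by norm_num)) (PySem.Int.mod_lt _ (by norm_num))
      (PySem.Int.mod_nonneg _ (by norm_num)) (PySem.Int.mod_lt _ (by norm_num))]
  rw [PySem.List.length_pyRange_one]
  simp only [List.nil_append]
  norm_num
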